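-- pv_equiv track=rewrite | github.com/AleksOfficial/Codecademy | censor_dispenser/censor_dispenser.py | encryptor_one_word
-- ===== SOURCE A (Python) =====
-- def encryptor_one_word(word,email):
--   length = len(word)
--   new_mail =""
--   i = 0
--
--   while i < len(email):
--     to_be_encrypted = email[i:i+length]
--     if(to_be_encrypted==word.lower() or to_be_encrypted==word.upper() or to_be_encrypted==word.title() or to_be_encrypted==word):
--       for j in range(length):
--         new_mail+="#"
--         i+=1
--     else:
--       new_mail += email[i]
--       i+=1
--   return new_mail
-- ===== SOURCE B (Python) =====
-- def encryptor_one_word(word, email):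
--   if not word:
--     return email
--   length = len(word)
--   variants = {word, word.lower(), word.upper(), word.title()}
--   pieces = []
--   pos = 0
--   while pos < len(email):
--     hits = [j for j in (email.find(v, pos) for v in variants) if j != -1]
--     if not hits:
--       pieces.append(email[pos:])
--       break
--     j = min(hits)
--     pieces.append(email[pos:j])
--     pieces.append("#" * length)
--     pos = j + length
--   return "".join(pieces)
-- ===== Notes on version B (the rewrite author's own statement) =====
-- stated objective: faster
-- what changed: A slices and compares the four casing variants at every character position; B computes the variant set once and uses str.find to jump directly to the leftmost next occurrence, copying whole unmatched stretches with slices.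
import Mathlib
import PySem

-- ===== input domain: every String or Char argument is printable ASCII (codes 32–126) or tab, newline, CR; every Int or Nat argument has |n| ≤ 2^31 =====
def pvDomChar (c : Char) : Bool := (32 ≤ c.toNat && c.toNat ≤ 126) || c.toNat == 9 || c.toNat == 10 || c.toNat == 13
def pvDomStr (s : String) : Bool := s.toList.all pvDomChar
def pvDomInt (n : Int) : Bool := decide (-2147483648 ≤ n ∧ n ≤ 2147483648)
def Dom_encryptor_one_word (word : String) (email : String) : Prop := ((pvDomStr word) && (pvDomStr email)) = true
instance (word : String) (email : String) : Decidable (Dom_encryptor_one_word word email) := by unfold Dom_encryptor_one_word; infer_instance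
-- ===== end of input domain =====

-- B replaces A's per-character slice-and-compare scan by str.find-based jumps to the next
-- occurrence of any casing variant (objective: faster, constant-factor on match-free text).
-- ===== PORT A =====

-- shared helper: Python's str.title(); exact on the ASCII domain (a char is cased iff alphabetic)
def pyTitleGo : List Char → Bool → List Char
  | [], _ => []
  | c :: rest, prevCased =>
    if PySem.Chars.isalpha c then
      (if prevCased then PySem.Chars.lowerChar c else PySem.Chars.upperChar c) :: pyTitleGo rest true
    else
      c :: pyTitleGo rest false

def pyTitle (s : List Char) : List Char := pyTitleGo s false

-- the while loop of A; fuel only makes the recursion structural (one unit per iteration;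
-- email.length + 1 suffices whenever word ≠ "", and with word = "" the Python loop never returns)
def encLoopA (w e : List Char) (L : Nat) : Nat → Nat → List Char → List Char
  | 0, _, acc => acc
  | fuel + 1, i, acc =>
    if i < e.length then
      let tbe := PySem.List.slice e (some (i : Int)) (some ((i : Int) + (L : Int)))
      if tbe == PySem.Chars.lower w || tbe == PySem.Chars.upper w || tbe == pyTitle w || tbe == w then
        encLoopA w e L fuel (i + L) (acc ++ List.replicate L '#')
      else
        encLoopA w e L fuel (i + 1) (acc ++ [e.getD i ' '])   -- e.getD i ' ' = email[i]: exact since i < e.length here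
    else acc

def encryptor_one_word (word : String) (email : String) : String :=
  let w := word.toList
  let e := email.toList
  String.ofList (encLoopA w e w.length (e.length + 1) 0 [])

-- ===== PORT B =====

-- the while loop of B: jump to the leftmost occurrence (str.find) of any variant
def encLoopB (variants : List (List Char)) (L : Nat) (e : List Char) :
    Nat → Nat → List (List Char) → List (List Char)
  | 0, _, pieces => pieces
  | fuel + 1, pos, pieces =>
    if pos < e.length then
      let hits := (variants.map (fun v => PySem.Chars.findFrom e v (pos : Int))).filter (· ≠ -1)
      match PySem.List.min? hits (fun j => j) with
      | none => pieces ++ [PySem.List.slice e (some (pos : Int)) none]   -- email[pos:], then break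
      | some j =>
          encLoopB variants L e fuel (j.toNat + L)
            (pieces ++ [PySem.List.slice e (some (pos : Int)) (some j), List.replicate L '#'])
    else pieces

def encryptor_one_word_alt (word : String) (email : String) : String :=
  let w := word.toList
  let e := email.toList
  if w = [] then email
  else
    let variants : PySem.Set (List Char) :=
      PySem.Set.ofList [w, PySem.Chars.lower w, PySem.Chars.upper w, pyTitle w]
    String.ofList (PySem.Chars.join [] (encLoopB variants w.length e (e.length + 1) 0 []))

-- ===== PRECONDITION & SPEC =====
-- Pre_ excludes only word = "" with email ≠ "": there A's while loop never advances i (the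
-- inner for-loop runs zero times) and the Python A diverges, returning nothing to match.
def Pre_encryptor_one_word (word : String) (email : String) : Prop := word ≠ "" ∨ email = ""
instance (word : String) (email : String) : Decidable (Pre_encryptor_one_word word email) := by
  unfold Pre_encryptor_one_word; infer_instance

def pvWitness_encryptor_one_word : String × String := ("ham", "Ham or HAM or hAm?")

def Spec_encryptor_one_word (word : String) (email : String) (out : String) : Prop := out = encryptor_one_word_alt word email
instance (word : String) (email : String) (out : String) : Decidable (Spec_encryptor_one_word word email out) := by unfold Spec_encryptor_one_word; infer_instance

-- ===== CLAIM (what is proved, stated in full; the proofs are below) =====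
def Claim_equal_encryptor_one_word : Prop := ∀ (word : String) (email : String), Dom_encryptor_one_word word email → Pre_encryptor_one_word word email → Spec_encryptor_one_word word email (encryptor_one_word word email)

-- ===== LEMMAS AND PROOFS =====

-- the match test both loops make at the head of `rem` (A's four comparisons, in A's order)
def pvHit (w : List Char) (L : Nat) (rem : List Char) : Bool :=
  rem.take L == PySem.Chars.lower w || rem.take L == PySem.Chars.upper w ||
  rem.take L == pyTitle w || rem.take L == w

-- the common mathematical description of the censored text (proof-side only)
def pvCensor (w : List Char) (L : Nat) (hL : 0 < L) : List Char → List Char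
  | [] => []
  | c :: rest =>
    if pvHit w L (c :: rest) then
      List.replicate L '#' ++ pvCensor w L hL ((c :: rest).drop L)
    else
      c :: pvCensor w L hL rest
termination_by rem => rem.length
decreasing_by
  · simp; omega
  · simp

theorem pvTitleGo_length (s : List Char) (b : Bool) : (pyTitleGo s b).length = s.length := by
  induction s generalizing b with
  | nil => rfl
  | cons c rest ih => simp [pyTitleGo]; split_ifs <;> simp [ih]

theorem pvCensor_step (w : List Char) (L : Nat) (hL : 0 < L) (e : List Char) (i : Nat)
    (h : i < e.length) :
    pvCensor w L hL (e.drop i) =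
      if pvHit w L (e.drop i) then
        List.replicate L '#' ++ pvCensor w L hL (e.drop (i + L))
      else
        e[i] :: pvCensor w L hL (e.drop (i + 1)) := by
  conv_lhs => rw [List.drop_eq_getElem_cons h, pvCensor]
  rw [← List.drop_eq_getElem_cons h, List.drop_drop]

theorem encLoopA_censor (w e : List Char) (L : Nat) (hL : 0 < L) (hLw : L = w.length)
    (fuel i : Nat) (acc : List Char) (hfuel : e.length - i < fuel) :
    encLoopA w e L fuel i acc = acc ++ pvCensor w L hL (e.drop i) := by
  induction fuel generalizing i acc with
  | zero => omega
  | succ fuel ih =>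
    rw [encLoopA]
    by_cases h : i < e.length
    · simp only [if_pos h, PySem.List.slice_natCast_add]
      rw [pvCensor_step w L hL e i h]
      by_cases hc : pvHit w L (e.drop i)
      · have hc' := hc
        unfold pvHit at hc'
        simp only [hc', if_pos hc]
        rw [ih (i + L) _ (by omega)]
        simp
      · have hc' := hc
        unfold pvHit at hc'
        simp only [Bool.not_eq_true] at hc'
        simp only [hc', if_neg hc, Bool.false_eq_true, if_false]
        rw [ih (i + 1) _ (by omega), List.getD_eq_getElem e ' ' h]
        simp
    · have : e.drop i = [] := List.drop_eq_nil_of_le (by omega)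
      simp [if_neg h, this, pvCensor]

-- "is one of the four casing variants of w"
def pvIsVar (w v : List Char) : Prop :=
  v = PySem.Chars.lower w ∨ v = PySem.Chars.upper w ∨ v = pyTitle w ∨ v = w

theorem pvVar_length (w v : List Char) (h : pvIsVar w v) : v.length = w.length := by
  rcases h with h | h | h | h <;> subst h
  · unfold PySem.Chars.lower; simp
  · unfold PySem.Chars.upper; simp
  · exact pvTitleGo_length w false
  · rfl

theorem pvHit_iff (w : List Char) (rem : List Char) :
    pvHit w w.length rem = true ↔ ∃ v, pvIsVar w v ∧ v <+: rem := by
  have key : ∀ v : List Char, v.length = w.length →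
      ((rem.take w.length == v) = true ↔ v <+: rem) := by
    intro v hv
    rw [beq_iff_eq]
    constructor
    · intro h
      have hlen : w.length ≤ rem.length := by
        have := congrArg List.length h
        simp at this; omega
      rw [List.prefix_iff_eq_take, hv, h]
    · intro h
      rw [List.prefix_iff_eq_take, hv] at h
      exact h.symm
  constructor
  · intro h
    unfold pvHit at h
    simp only [Bool.or_eq_true] at h
    rcases h with ((h | h) | h) | h
    · exact ⟨_, Or.inl rfl, (key _ (pvVar_length w _ (Or.inl rfl))).mp h⟩
    · exact ⟨_, Or.inr (Or.inl rfl), (key _ (pvVar_length w _ (Or.inr (Or.inl rfl)))).mp h⟩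
    · exact ⟨_, Or.inr (Or.inr (Or.inl rfl)), (key _ (pvVar_length w _ (Or.inr (Or.inr (Or.inl rfl))))).mp h⟩
    · exact ⟨_, Or.inr (Or.inr (Or.inr rfl)), (key _ (pvVar_length w _ (Or.inr (Or.inr (Or.inr rfl))))).mp h⟩
  · rintro ⟨v, hvv, hp⟩
    unfold pvHit
    simp only [Bool.or_eq_true]
    rcases hvv with h | h | h | h <;> rw [h] at hp
    · exact Or.inl (Or.inl (Or.inl ((key _ (pvVar_length w _ (Or.inl rfl))).mpr hp)))
    · exact Or.inl (Or.inl (Or.inr ((key _ (pvVar_length w _ (Or.inr (Or.inl rfl)))).mpr hp)))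
    · exact Or.inl (Or.inr ((key _ (pvVar_length w _ (Or.inr (Or.inr (Or.inl rfl))))).mpr hp))
    · exact Or.inr ((key _ (pvVar_length w _ (Or.inr (Or.inr (Or.inr rfl))))).mpr hp)

-- skipping a hit-free stretch copies it verbatim
theorem pvCensor_skip (w : List Char) (L : Nat) (hL : 0 < L) (m : Nat) :
    ∀ (rem : List Char), (∀ k < m, pvHit w L (rem.drop k) = false) →
    pvCensor w L hL rem = rem.take m ++ pvCensor w L hL (rem.drop m) := by
  induction m with
  | zero => intro rem _; simp
  | succ m ih =>
    intro rem hk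
    cases rem with
    | nil => simp [pvCensor]
    | cons c rest =>
      rw [pvCensor]
      have h0 := hk 0 (by omega)
      simp only [List.drop_zero] at h0
      rw [if_neg (by simp [h0])]
      rw [ih rest (fun k hkm => by simpa using hk (k + 1) (by omega))]
      simp

-- with no hit anywhere, the text is returned unchanged
theorem pvCensor_id (w : List Char) (L : Nat) (hL : 0 < L) :
    ∀ (rem : List Char), (∀ k, pvHit w L (rem.drop k) = false) →
    pvCensor w L hL rem = rem := by
  intro rem h
  induction rem with
  | nil => simp [pvCensor]
  | cons c rest ih =>
    rw [pvCensor]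
    have h0 := h 0
    simp only [List.drop_zero] at h0
    rw [if_neg (by simp [h0])]
    rw [ih (fun k => by simpa using h (k + 1))]

-- a nonempty list has a Python minimum
theorem pvMin?_eq_none (xs : List Int) (h : PySem.List.min? xs (fun j => j) = none) : xs = [] :=
  (PySem.List.min?_eq_none_iff xs (fun j => j)).mp h

theorem encLoopB_censor (w e : List Char) (L : Nat) (hL : 0 < L) (hLw : L = w.length)
    (variants : List (List Char))
    (hv : ∀ v, v ∈ variants ↔ pvIsVar w v)
    (fuel pos : Nat) (pieces : List (List Char)) (hfuel : e.length - pos < fuel) :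
    (encLoopB variants L e fuel pos pieces).flatten = pieces.flatten ++ pvCensor w L hL (e.drop pos) := by
  induction fuel generalizing pos pieces with
  | zero => omega
  | succ fuel ih =>
    rw [encLoopB]
    by_cases h : pos < e.length
    · simp only [if_pos h]
      set hits := (variants.map (fun v => PySem.Chars.findFrom e v (pos : Int))).filter (· ≠ -1) with hhits
      have hpose : pos ≤ e.length := by omega
      cases hmin : PySem.List.min? hits (fun j => j) with
      | none =>
        -- no variant occurs at or after pos: the rest is copied verbatim
        have hnil : hits = [] := pvMin?_eq_none _ hmin
        have hno : ∀ v, pvIsVar w v → ¬ v <:+: e.drop pos := by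
          intro v hvv
          have hmem : v ∈ variants := (hv v).mpr hvv
          have : PySem.Chars.findFrom e v (pos : Int) = -1 := by
            by_contra hne
            have : PySem.Chars.findFrom e v (pos : Int) ∈ hits := by
              rw [hhits]
              exact List.mem_filter.mpr ⟨List.mem_map_of_mem hmem, by simpa using hne⟩
            rw [hnil] at this; simp at this
          exact (PySem.Chars.findFrom_natCast_eq_neg_one_iff e v pos hpose).mp this
        have hid : pvCensor w L hL (e.drop pos) = e.drop pos := by
          apply pvCensor_id
          intro k
          by_contra hcon
          simp only [Bool.not_eq_false] at hcon
          rw [List.drop_drop, hLw] at hcon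
          obtain ⟨v, hvv, hp⟩ := (pvHit_iff w _).mp hcon
          have : v <:+: e.drop pos := by
            have h2 : e.drop (pos + k) <:+ e.drop pos := by
              rw [← List.drop_drop]
              exact List.drop_suffix k (e.drop pos)
            exact hp.isInfix.trans h2.isInfix
          exact hno v hvv this
        simp [hid, PySem.List.slice_from e (by positivity : (0:Int) ≤ (pos:Int))]
      | some j =>
        -- j is the leftmost occurrence of any variant at or after pos
        have hjmem : j ∈ hits := PySem.List.min?_mem hmin
        have hjmin : ∀ x ∈ hits, j ≤ x := PySem.List.min?_isMin hmin
        obtain ⟨v0, hv0mem, hv0j⟩ : ∃ v0 ∈ variants, PySem.Chars.findFrom e v0 (pos : Int) = j := by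
          rw [hhits] at hjmem
          obtain ⟨hj1, _⟩ := List.mem_filter.mp hjmem
          obtain ⟨v0, hm, he⟩ := List.mem_map.mp hj1
          exact ⟨v0, hm, he⟩
        have hjne : PySem.Chars.findFrom e v0 (pos : Int) ≠ -1 := by
          rw [hv0j]
          intro hcon
          have := List.mem_filter.mp (hhits ▸ hjmem)
          simp [hcon] at this
        obtain ⟨hjpos, hjpref, hjminimal⟩ := PySem.Chars.findFrom_natCast_spec e v0 pos hpose hjne
        rw [hv0j] at hjpos hjpref hjminimal
        have hj0 : 0 ≤ j := le_trans (by positivity) hjpos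
        have hjn : pos ≤ j.toNat := by omega
        -- no hit strictly before j
        have hskip : ∀ k < j.toNat - pos, pvHit w L ((e.drop pos).drop k) = false := by
          intro k hkm
          by_contra hcon
          simp only [Bool.not_eq_false] at hcon
          rw [List.drop_drop, hLw] at hcon
          obtain ⟨v, hvv, hp⟩ := (pvHit_iff w _).mp hcon
          have hmemv : v ∈ variants := (hv v).mpr hvv
          cases hfv : PySem.Chars.findFrom e v (pos : Int) == -1 with
          | true =>
            have : ¬ v <:+: e.drop pos :=
              (PySem.Chars.findFrom_natCast_eq_neg_one_iff e v pos hpose).mp (by simpa using hfv)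
            apply this
            have h2 : e.drop (pos + k) <:+ e.drop pos := by
              rw [← List.drop_drop]; exact List.drop_suffix k (e.drop pos)
            exact hp.isInfix.trans h2.isInfix
          | false =>
            have hfvne : PySem.Chars.findFrom e v (pos : Int) ≠ -1 := by simpa using hfv
            have hin : PySem.Chars.findFrom e v (pos : Int) ∈ hits := by
              rw [hhits]
              exact List.mem_filter.mpr ⟨List.mem_map_of_mem hmemv, by simpa using hfvne⟩
            have hjle := hjmin _ hin
            obtain ⟨_, _, hminv⟩ := PySem.Chars.findFrom_natCast_spec e v pos hpose hfvne
            exact hminv (pos + k) (by omega)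
              (by omega)
              hp
        have hcensor1 : pvCensor w L hL (e.drop pos) =
            (e.drop pos).take (j.toNat - pos) ++ pvCensor w L hL (e.drop j.toNat) := by
          rw [pvCensor_skip w L hL (j.toNat - pos) (e.drop pos) hskip, List.drop_drop,
            show pos + (j.toNat - pos) = j.toNat from by omega]
        have hjlt : j.toNat < e.length := by
          have hne0 : v0 ≠ [] := by
            intro hc
            have := pvVar_length w v0 ((hv v0).mp hv0mem)
            rw [hc] at this
            simp at this; omega
          have := hjpref.length_le
          have : 0 < v0.length := List.length_pos_iff.mpr hne0
          have h2 := hjpref.length_le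
          simp at h2
          omega
        have hhit : pvHit w L (e.drop j.toNat) = true := by
          rw [hLw]
          exact (pvHit_iff w _).mpr ⟨v0, (hv v0).mp hv0mem, hjpref⟩
        have hcensor2 : pvCensor w L hL (e.drop j.toNat) =
            List.replicate L '#' ++ pvCensor w L hL (e.drop (j.toNat + L)) := by
          rw [pvCensor_step w L hL e j.toNat hjlt, if_pos hhit]
        rw [ih (j.toNat + L) _ (by omega)]
        have hslice : PySem.List.slice e (some (pos : Int)) (some j) =
            (e.drop pos).take (j.toNat - pos) := by
          rw [show j = ((j.toNat : Nat) : Int) from (Int.toNat_of_nonneg hj0).symm]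
          exact PySem.List.slice_natCast e pos j.toNat
        simp [hslice, hcensor1, hcensor2]
    · have : e.drop pos = [] := List.drop_eq_nil_of_le (by omega)
      simp [if_neg h, this, pvCensor]

-- ===== VERDICT (by name: the statement is the Claim_ definition above) =====
theorem pvJoin_nil (p : List (List Char)) : PySem.Chars.join [] p = p.flatten := by
  unfold PySem.Chars.join
  induction p with
  | nil => rfl
  | cons h t ih => cases t <;> simp_all [List.intercalate, List.intersperse]

theorem encryptor_one_word_spec : Claim_equal_encryptor_one_word := by
  intro word email _ hpre
  unfold Spec_encryptor_one_word
  by_cases hw : word.toList = []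
  · have hw' : word = "" := String.toList_eq_nil_iff.mp hw
    have he : email = "" := by
      rcases hpre with h | h
      · exact absurd hw' h
      · exact h
    subst hw' he
    decide
  · have hL : 0 < word.toList.length := List.length_pos_iff.mpr hw
    unfold encryptor_one_word encryptor_one_word_alt
    simp only [if_neg hw]
    rw [encLoopA_censor word.toList email.toList word.toList.length hL rfl _ 0 []
      (by omega), pvJoin_nil,
      encLoopB_censor word.toList email.toList word.toList.length hL rfl _
        (by
          intro v
          rw [PySem.Set.mem_ofList]
          unfold pvIsVar
          simp only [List.mem_cons, List.not_mem_nil, or_false]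
          tauto)
        _ 0 [] (by omega)]
    simp
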